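-- pv_equiv track=rewrite | github.com/huangsam/python-algorithms | algorithms/string/chainable.py | can_chain
-- ===== SOURCE A (Python) =====
-- def can_chain(words: list[str]):
--     first_map: dict[str, set[str]] = {}
--     for word in words:
--         ch = word[0]
--         if ch not in first_map:
--             first_map[ch] = set()
--         first_map[ch].add(word)
--     return _can_chain_wh(words[0], words, first_map, set())
--
-- def _can_chain_wh(
--     cur_word: str, words: list[str], first_map: dict[str, set[str]], seen: set[str]
-- ):
--     if len(words) == len(seen):
--         return True
--     if cur_word in seen:
--         return False
--     seen.add(cur_word)
--     lch = cur_word[-1]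
--     if lch not in first_map:
--         return False
--     for next_word in first_map[lch]:
--         if _can_chain_wh(next_word, words, first_map, seen):
--             return True
--     return False
-- ===== SOURCE B (Python) =====
-- def can_chain(words: list[str]):
--     # distinct check (A can only reach len(seen)==len(words) when words are distinct)
--     if len(set(words)) != len(words):
--         return False
--     # char-level graph: first char -> set of last chars
--     outs: dict[str, set[str]] = {}
--     for w in words:
--         outs.setdefault(w[0], set()).add(w[-1])
--     # fixpoint iteration: chars reachable from the last char of words[0]
--     active = {words[0][-1]}
--     for _ in range(len(words) + 1):
--         new = set()
--         for c in active:
--             new |= outs.get(c, set())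
--         if new <= active:
--             break
--         active |= new
--     # a word is reachable iff it is words[0] or its first char is activated
--     return all(w[0] in active for w in words[1:])
-- ===== Notes on version B (the rewrite author's own statement) =====
-- stated objective: faster
-- what changed: A's word-level DFS with a shared seen set (which rescans a first-letter bucket of words at every visited word, recursion depth up to len(words)) is replaced by a distinctness check plus a fixpoint saturation over the at-most-~100 first/last characters; a word is reachable iff it is words[0] or its first char gets activated.
-- outside the precondition, e.g. on can_chain(['ab', 'bc']): A returns False, B returns True
import Mathlib
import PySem

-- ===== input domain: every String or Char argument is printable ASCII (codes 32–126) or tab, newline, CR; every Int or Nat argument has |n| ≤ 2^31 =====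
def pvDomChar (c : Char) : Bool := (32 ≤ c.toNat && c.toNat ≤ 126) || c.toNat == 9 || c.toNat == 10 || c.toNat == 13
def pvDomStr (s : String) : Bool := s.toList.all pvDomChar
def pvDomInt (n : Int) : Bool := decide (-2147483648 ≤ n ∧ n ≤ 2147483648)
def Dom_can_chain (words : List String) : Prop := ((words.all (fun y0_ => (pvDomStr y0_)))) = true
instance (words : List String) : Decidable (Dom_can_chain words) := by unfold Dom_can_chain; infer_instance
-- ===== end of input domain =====

-- B replaces A's word-level DFS (which rescans a first-letter bucket of words at every visited word) by a
-- distinctness check plus a small fixpoint computation over first/last characters; objective: faster.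

-- shared accessors: w[0], w[-1], words[0] — Python raises IndexError on "" / []; Pre_ excludes those
-- inputs, so the .getD default is never reached on admitted inputs (PySem.*.pyGet? is exact there).
def pvHeadC (w : String) : Char := (PySem.Str.pyGet? w 0).getD ' '
def pvLastC (w : String) : Char := (PySem.Str.pyGet? w (-1)).getD ' '
def pvFirst (words : List String) : String := (PySem.List.pyGet? words 0).getD ""

-- ===== PORT A =====
-- first_map: {first char -> set of words starting with it}; one loop iteration:
def pvFmStep (fm : PySem.Dict Char (PySem.Set String)) (word : String) :
    PySem.Dict Char (PySem.Set String) :=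
  let ch := pvHeadC word
  let fm' := if fm.contains ch then fm else fm.insert ch PySem.Set.empty
  fm'.modify ch PySem.Set.empty (fun s => PySem.Set.add s word)

def pvFirstMap (words : List String) : PySem.Dict Char (PySem.Set String) :=
  words.foldl pvFmStep PySem.Dict.empty

-- _can_chain_wh: the mutated 'seen' set is threaded through as state.  The fuel argument only makes the
-- recursion structural: the Python recursion depth is at most len(words)+1 (each level adds a new word to
-- seen before recursing), so fuel len(words)+1 is never exhausted.  The 'for next_word in first_map[lch]'
-- loop iterates in the Set's element (insertion) order; this is exact wherever the result does not depend
-- on Python's set iteration order, which Pre_ guarantees.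
def pvWh (words : List String) (fm : PySem.Dict Char (PySem.Set String)) :
    Nat → String → PySem.Set String → Bool × PySem.Set String
  | 0, _, seen => (false, seen)
  | fuel+1, cur, seen =>
    if (words.length : Int) = PySem.Set.len seen then (true, seen)
    else if PySem.Set.contains seen cur then (false, seen)
    else
      let seen1 := PySem.Set.add seen cur
      match fm.get? (pvLastC cur) with
      | none => (false, seen1)
      | some succs =>
        succs.foldl (fun r w => if r.1 then r else pvWh words fm fuel w r.2) (false, seen1)

def can_chain (words : List String) : Bool :=
  (pvWh words (pvFirstMap words) (words.length + 1) (pvFirst words) PySem.Set.empty).1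

-- ===== PORT B =====
-- outs: {first char -> set of last chars}  (outs.setdefault(w[0], set()).add(w[-1]))
def pvOutsStep (outs : PySem.Dict Char (PySem.Set Char)) (w : String) :
    PySem.Dict Char (PySem.Set Char) :=
  outs.modify (pvHeadC w) PySem.Set.empty (fun s => PySem.Set.add s (pvLastC w))

def pvOuts (words : List String) : PySem.Dict Char (PySem.Set Char) :=
  words.foldl pvOutsStep PySem.Dict.empty

-- new = union of outs.get(c, set()) over c in active
def pvGrow (outs : PySem.Dict Char (PySem.Set Char)) (active : PySem.Set Char) : PySem.Set Char :=
  List.foldl (fun nw c => PySem.Set.union nw (outs.getD c PySem.Set.empty)) PySem.Set.empty active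

-- 'for _ in range(k): new = step(active); if new <= active: break; active |= new'
def pvSat (step : PySem.Set Char → PySem.Set Char) : Nat → PySem.Set Char → PySem.Set Char
  | 0, active => active
  | k+1, active =>
    let nw := step active
    if PySem.Set.issubset nw active then active
    else pvSat step k (PySem.Set.union active nw)

def can_chain_alt (words : List String) : Bool :=
  if PySem.Set.len (PySem.Set.ofList words) ≠ (words.length : Int) then false
  else
    let active := pvSat (pvGrow (pvOuts words)) (words.length + 1)
      (PySem.Set.ofList [pvLastC (pvFirst words)])
    (PySem.List.slice words (some 1)).all fun w => PySem.Set.contains active (pvHeadC w)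

-- ===== PRECONDITION & SPEC =====
-- the set of characters reachable from words[0][-1] through the 'first char -> last char' steps of words.
-- A computed saturation is the only way to state reachability decidably; lemma pvReach_iff below proves
-- that membership in pvReach is exactly the reflexive-transitive closure pvReachesC of the one-step
-- relation pvCstep, which is how Pre_ should be read.  Not used by either port.
def pvReach (words : List String) : PySem.Set Char :=
  pvSat (fun s => PySem.Set.ofList ((words.filter fun w => PySem.Set.contains s (pvHeadC w)).map pvLastC))
    (words.length + 1) (PySem.Set.ofList [pvLastC (pvFirst words)])

-- Pre_ excludes (a) the empty list and lists containing "" (A raises IndexError there), and (b) the corner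
-- where the words are distinct, every word is reachable from words[0] in the chain graph, and some word is
-- a dead end (its last char starts no word): there A's True/False depends on Python's hash-based set
-- iteration order (and where it happens to be deterministic it is an accident of that order).
def Pre_can_chain (words : List String) : Prop :=
  words ≠ [] ∧ (∀ w ∈ words, w ≠ "") ∧
  ¬(words.Nodup ∧ (∀ w ∈ words.drop 1, pvHeadC w ∈ pvReach words) ∧
      ∃ w ∈ words, ∀ u ∈ words, pvHeadC u ≠ pvLastC w)
instance (words : List String) : Decidable (Pre_can_chain words) := by
  unfold Pre_can_chain; infer_instance

def pvWitness_can_chain : List String := (["ab", "ba"])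

def Spec_can_chain (words : List String) (out : Bool) : Prop := out = can_chain_alt words
instance (words : List String) (out : Bool) : Decidable (Spec_can_chain words out) := by
  unfold Spec_can_chain; infer_instance

-- ===== CLAIM (what is proved, stated in full; the proofs are below) =====
def Claim_equal_can_chain : Prop :=
  ∀ (words : List String), Dom_can_chain words → Pre_can_chain words →
    Spec_can_chain words (can_chain words)

-- ===== LEMMAS AND PROOFS =====

-- char-level chain relation and reachability (the common specification both ports are proved against)
def pvCstep (words : List String) (c d : Char) : Prop :=
  ∃ w ∈ words, pvHeadC w = c ∧ pvLastC w = d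
def pvReachesC (words : List String) (c : Char) : Prop :=
  Relation.ReflTransGen (pvCstep words) (pvLastC (pvFirst words)) c

-- ---- small Set facts ----
lemma pvPrefix_add {α : Type} [BEq α] (s : PySem.Set α) (x : α) : s <+: PySem.Set.add s x := by
  unfold PySem.Set.add
  split
  · exact List.prefix_rfl
  · exact List.prefix_append _ _

lemma pvPrefix_update {α : Type} [BEq α] (t s : PySem.Set α) : s <+: PySem.Set.update s t := by
  induction t generalizing s with
  | nil => exact List.prefix_rfl
  | cons x xs ih =>
    have h1 : PySem.Set.update s (x :: xs) = PySem.Set.update (PySem.Set.add s x) xs := rfl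
    rw [h1]
    exact (pvPrefix_add s x).trans (ih _)

lemma pvPrefix_union {α : Type} [BEq α] (s t : PySem.Set α) : s <+: PySem.Set.union s t :=
  pvPrefix_update t s

lemma pvAdd_length_le {α : Type} [BEq α] (s : PySem.Set α) (x : α) :
    (PySem.Set.add s x).length ≤ s.length + 1 := by
  unfold PySem.Set.add
  split
  · omega
  · simp

lemma pvFoldl_add_length_le {α : Type} [BEq α] (l : List α) :
    ∀ acc : PySem.Set α, (l.foldl PySem.Set.add acc).length ≤ acc.length + l.length := by
  induction l with
  | nil => intro acc; simp
  | cons x xs ih =>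
    intro acc
    have h1 := ih (PySem.Set.add acc x)
    have h2 := pvAdd_length_le acc x
    simpa [List.foldl_cons] using le_trans h1 (by omega)

lemma pvOfList_length_le {α : Type} [BEq α] (l : List α) :
    (PySem.Set.ofList l).length ≤ l.length := by
  have := pvFoldl_add_length_le l (PySem.Set.empty)
  simpa [PySem.Set.ofList, PySem.Set.empty] using this

lemma pvNodup_subset_length {α : Type} [DecidableEq α] (l T : List α)
    (h : l.Nodup) (hT : T.Nodup) (hsub : ∀ x ∈ l, x ∈ T) : l.length ≤ T.length := by
  have h3 : l.toFinset ⊆ T.toFinset := by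
    intro a ha
    rw [List.mem_toFinset] at *
    exact hsub a ha
  calc l.length = l.toFinset.card := (List.toFinset_card_of_nodup h).symm
    _ ≤ T.toFinset.card := Finset.card_le_card h3
    _ = T.length := List.toFinset_card_of_nodup hT

lemma pvUnion_length_succ_le {α : Type} [BEq α] [LawfulBEq α] (s t : PySem.Set α) (x : α)
    (hx : x ∈ t) (hxs : x ∉ s) : s.length + 1 ≤ (PySem.Set.union s t).length := by
  obtain ⟨r, hr⟩ := pvPrefix_union s t
  have hxm : x ∈ PySem.Set.union s t := (PySem.Set.mem_union s t x).mpr (Or.inr hx)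
  rw [← hr] at hxm ⊢
  have : r ≠ [] := by
    rintro rfl
    simp at hxm
    exact hxs hxm
  have : 0 < r.length := List.length_pos_iff.mpr this
  simp only [List.length_append]
  omega

lemma pvFoldl_add_of_nodup {α : Type} [BEq α] [LawfulBEq α] (l : List α) :
    ∀ acc : PySem.Set α, (acc ++ l).Nodup → l.foldl PySem.Set.add acc = acc ++ l := by
  induction l with
  | nil => intro acc _; simp
  | cons x xs ih =>
    intro acc hnd
    have hx : x ∉ acc := by
      intro hmem
      have := List.disjoint_of_nodup_append hnd
      exact this hmem (by simp)
    have hadd : PySem.Set.add acc x = acc ++ [x] := by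
      unfold PySem.Set.add
      simp [hx]
    have hnd' : ((acc ++ [x]) ++ xs).Nodup := by simpa using hnd
    calc (x :: xs).foldl PySem.Set.add acc = xs.foldl PySem.Set.add (PySem.Set.add acc x) := rfl
      _ = (acc ++ [x]) ++ xs := by rw [hadd]; exact ih _ hnd'
      _ = acc ++ x :: xs := by simp

lemma pvNodup_ofList_eq_self {α : Type} [BEq α] [LawfulBEq α] (l : List α) (h : l.Nodup) :
    PySem.Set.ofList l = l := by
  have := pvFoldl_add_of_nodup l (PySem.Set.empty) (by simpa [PySem.Set.empty] using h)
  simpa [PySem.Set.ofList, PySem.Set.empty] using this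

lemma pvOfList_len_eq_iff (words : List String) :
    ((PySem.Set.ofList words).length = words.length ↔ words.Nodup) := by
  constructor
  · intro hlen
    by_contra hnd
    have h1 : (PySem.Set.ofList words).toFinset = words.toFinset := by
      ext a
      simp [List.mem_toFinset, PySem.Set.mem_ofList]
    have h2 : (PySem.Set.ofList words).length = words.toFinset.card := by
      rw [← h1]
      exact (List.toFinset_card_of_nodup (PySem.Set.nodup_ofList words)).symm
    have h3 : words.toFinset.card = words.dedup.length := List.card_toFinset words
    have h4 : words.dedup.Sublist words := List.dedup_sublist words
    have h5 : words.dedup = words := by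
      apply List.Sublist.eq_of_length h4
      omega
    exact hnd (List.dedup_eq_self.mp h5)
  · intro hnd
    rw [pvNodup_ofList_eq_self words hnd]

-- ---- dict facts ----
lemma pvGetD_of_not_contains {κ ν : Type} [BEq κ] (d : PySem.Dict κ ν) (k : κ) (dflt : ν)
    (h : d.contains k = false) : d.getD k dflt = dflt := by
  have hget : d.get? k = none := by
    unfold PySem.Dict.get?
    rw [Option.map_eq_none_iff, List.find?_eq_none]
    intro p hp
    unfold PySem.Dict.contains at h
    rw [List.any_eq_false] at h
    exact fun hb => (h p hp) hb
  simp [PySem.Dict.getD, hget]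

lemma pvGetD_of_get?_some {κ ν : Type} [BEq κ] (d : PySem.Dict κ ν) (k : κ) (dflt v : ν)
    (h : d.get? k = some v) : d.getD k dflt = v := by
  simp [PySem.Dict.getD, h]

-- ---- builder characterizations ----
lemma pvFmStep_getD (fm : PySem.Dict Char (PySem.Set String)) (w : String) (c : Char) :
    (pvFmStep fm w).getD c PySem.Set.empty
    = if c = pvHeadC w then PySem.Set.add (fm.getD (pvHeadC w) PySem.Set.empty) w
      else fm.getD c PySem.Set.empty := by
  by_cases hc : fm.contains (pvHeadC w)
  · simp only [pvFmStep, hc, if_true]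
    rw [PySem.Dict.getD_modify]
  · have hc' : fm.contains (pvHeadC w) = false := by simpa using hc
    simp only [pvFmStep, hc', Bool.false_eq_true, if_false]
    rw [PySem.Dict.getD_modify, pvGetD_of_not_contains fm _ _ hc']
    split_ifs with h2
    · simp
    · simp [PySem.Dict.getD_insert, h2]

lemma pvMem_fm_aux (l : List String) :
    ∀ (fm : PySem.Dict Char (PySem.Set String)) (c : Char) (v : String),
      v ∈ (l.foldl pvFmStep fm).getD c PySem.Set.empty
      ↔ v ∈ fm.getD c PySem.Set.empty ∨ (v ∈ l ∧ pvHeadC v = c) := by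
  induction l with
  | nil => intro fm c v; simp
  | cons w l ih =>
    intro fm c v
    rw [List.foldl_cons, ih, pvFmStep_getD]
    by_cases hcw : c = pvHeadC w
    · subst hcw
      rw [if_pos rfl]
      simp only [PySem.Set.mem_add, List.mem_cons]
      constructor
      · rintro ((h | rfl) | h)
        · exact Or.inl h
        · exact Or.inr ⟨Or.inl rfl, rfl⟩
        · exact Or.inr ⟨Or.inr h.1, h.2⟩
      · rintro (h | ⟨(rfl | h), hh⟩)
        · exact Or.inl (Or.inl h)
        · exact Or.inl (Or.inr rfl)
        · exact Or.inr ⟨h, hh⟩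
    · simp only [if_neg hcw, List.mem_cons]
      constructor
      · rintro (h | h)
        · exact Or.inl h
        · exact Or.inr ⟨Or.inr h.1, h.2⟩
      · rintro (h | ⟨(rfl | h), hh⟩)
        · exact Or.inl h
        · exact absurd hh.symm (by simpa using hcw)
        · exact Or.inr ⟨h, hh⟩

lemma pvMem_fm (words : List String) (c : Char) (v : String) :
    v ∈ (pvFirstMap words).getD c PySem.Set.empty ↔ v ∈ words ∧ pvHeadC v = c := by
  unfold pvFirstMap
  rw [pvMem_fm_aux]
  simp [PySem.Set.empty, PySem.Dict.empty, PySem.Dict.getD, PySem.Dict.get?]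

lemma pvMem_outs_aux (l : List String) :
    ∀ (outs : PySem.Dict Char (PySem.Set Char)) (c d : Char),
      d ∈ (l.foldl pvOutsStep outs).getD c PySem.Set.empty
      ↔ d ∈ outs.getD c PySem.Set.empty ∨ ∃ w ∈ l, pvHeadC w = c ∧ pvLastC w = d := by
  induction l with
  | nil => intro outs c d; simp
  | cons w l ih =>
    intro outs c d
    rw [List.foldl_cons, ih]
    have hstep : (pvOutsStep outs w).getD c PySem.Set.empty
        = if c = pvHeadC w then PySem.Set.add (outs.getD (pvHeadC w) PySem.Set.empty) (pvLastC w)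
          else outs.getD c PySem.Set.empty := by
      unfold pvOutsStep
      rw [PySem.Dict.getD_modify]
    rw [hstep]
    by_cases hcw : c = pvHeadC w
    · subst hcw
      rw [if_pos rfl]
      simp only [PySem.Set.mem_add, List.mem_cons]
      constructor
      · rintro ((h | rfl) | ⟨u, hu, h1, h2⟩)
        · exact Or.inl h
        · exact Or.inr ⟨w, Or.inl rfl, rfl, rfl⟩
        · exact Or.inr ⟨u, Or.inr hu, h1, h2⟩
      · rintro (h | ⟨u, (rfl | hu), h1, h2⟩)
        · exact Or.inl (Or.inl h)
        · exact Or.inl (Or.inr h2.symm)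
        · exact Or.inr ⟨u, hu, h1, h2⟩
    · simp only [if_neg hcw, List.mem_cons]
      constructor
      · rintro (h | ⟨u, hu, h1, h2⟩)
        · exact Or.inl h
        · exact Or.inr ⟨u, Or.inr hu, h1, h2⟩
      · rintro (h | ⟨u, (rfl | hu), h1, h2⟩)
        · exact Or.inl h
        · exact absurd h1.symm hcw
        · exact Or.inr ⟨u, hu, h1, h2⟩

lemma pvMem_outs (words : List String) (c d : Char) :
    d ∈ (pvOuts words).getD c PySem.Set.empty ↔ ∃ w ∈ words, pvHeadC w = c ∧ pvLastC w = d := by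
  unfold pvOuts
  rw [pvMem_outs_aux]
  simp [PySem.Set.empty, PySem.Dict.empty, PySem.Dict.getD, PySem.Dict.get?]

lemma pvMem_grow_aux (outs : PySem.Dict Char (PySem.Set Char)) (cs : List Char) :
    ∀ (acc : PySem.Set Char) (d : Char),
      d ∈ cs.foldl (fun nw c => PySem.Set.union nw (outs.getD c PySem.Set.empty)) acc
      ↔ d ∈ acc ∨ ∃ c ∈ cs, d ∈ outs.getD c PySem.Set.empty := by
  induction cs with
  | nil => intro acc d; simp
  | cons c cs ih =>
    intro acc d
    rw [List.foldl_cons, ih]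
    simp only [PySem.Set.mem_union, List.mem_cons]
    constructor
    · rintro ((h | h) | ⟨c', hc', h⟩)
      · exact Or.inl h
      · exact Or.inr ⟨c, Or.inl rfl, h⟩
      · exact Or.inr ⟨c', Or.inr hc', h⟩
    · rintro (h | ⟨c', (rfl | hc'), h⟩)
      · exact Or.inl (Or.inl h)
      · exact Or.inl (Or.inr h)
      · exact Or.inr ⟨c', hc', h⟩

lemma pvMem_grow (outs : PySem.Dict Char (PySem.Set Char)) (active : PySem.Set Char) (d : Char) :
    d ∈ pvGrow outs active ↔ ∃ c ∈ active, d ∈ outs.getD c PySem.Set.empty := by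
  unfold pvGrow
  rw [pvMem_grow_aux]
  simp [PySem.Set.empty]

-- ---- pvSat facts ----
lemma pvSat_prefix (step : PySem.Set Char → PySem.Set Char) (k : Nat) :
    ∀ active : PySem.Set Char, active <+: pvSat step k active := by
  induction k with
  | zero => intro active; exact List.prefix_rfl
  | succ k ih =>
    intro active
    simp only [pvSat]
    split
    · exact List.prefix_rfl
    · exact (pvPrefix_union _ _).trans (ih _)

lemma pvSat_sound (step : PySem.Set Char → PySem.Set Char) (P : Char → Prop)
    (hstep : ∀ S, (∀ c ∈ S, P c) → ∀ d ∈ step S, P d) :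
    ∀ (k : Nat) (active : PySem.Set Char), (∀ c ∈ active, P c) →
      ∀ c ∈ pvSat step k active, P c := by
  intro k
  induction k with
  | zero => intro active h; exact h
  | succ k ih =>
    intro active h
    simp only [pvSat]
    split
    · exact h
    · refine ih _ ?_
      intro c hc
      rcases (PySem.Set.mem_union _ _ c).mp hc with h1 | h1
      · exact h c h1
      · exact hstep active h c h1

lemma pvSat_closed (step : PySem.Set Char → PySem.Set Char) (U : List Char) (hU : U.Nodup)
    (hstep : ∀ S, (∀ c ∈ S, c ∈ U) → ∀ d ∈ step S, d ∈ U) :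
    ∀ (k : Nat) (active : PySem.Set Char), active.Nodup → (∀ c ∈ active, c ∈ U) →
      U.length < active.length + k →
      ∀ d ∈ step (pvSat step k active), d ∈ pvSat step k active := by
  intro k
  induction k with
  | zero =>
    intro active hnd hsub hlen
    exact absurd (pvNodup_subset_length active U hnd hU hsub) (by omega)
  | succ k ih =>
    intro active hnd hsub hlen
    simp only [pvSat]
    split
    · next hss =>
      intro d hd
      exact (PySem.Set.issubset_iff _ _).mp hss d hd
    · next hss =>
      have hex : ∃ d ∈ step active, d ∉ active := by
        by_contra hcon
        push_neg at hcon
        exact hss ((PySem.Set.issubset_iff _ _).mpr hcon)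
      obtain ⟨d0, hd0, hd0n⟩ := hex
      refine ih _ (PySem.Set.nodup_union _ _ hnd) ?_ ?_
      · intro c hc
        rcases (PySem.Set.mem_union _ _ c).mp hc with h1 | h1
        · exact hsub c h1
        · exact hstep active hsub c h1
      · have := pvUnion_length_succ_le active (step active) d0 hd0 hd0n
        omega

-- minimality of reachability: any set containing the start char and closed under pvCstep
lemma pvReach_min (words : List String) (R : List Char)
    (hinit : pvLastC (pvFirst words) ∈ R)
    (hclosed : ∀ c d, c ∈ R → pvCstep words c d → d ∈ R) :
    ∀ c, pvReachesC words c → c ∈ R := by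
  intro c h
  induction h with
  | refl => exact hinit
  | tail _ hbc ih => exact hclosed _ _ ih hbc

-- both closure computations compute exactly pvReachesC
lemma pvOfList_singleton {α : Type} [BEq α] (x : α) : PySem.Set.ofList [x] = [x] := by
  simp [PySem.Set.ofList, PySem.Set.add, PySem.Set.empty, PySem.Set.contains]

-- the universe of chars any saturation stays inside: the start char together with all last chars
lemma pvU_spec (words : List String) :
    (PySem.Set.ofList (pvLastC (pvFirst words) :: words.map pvLastC)).Nodup ∧
    (∀ c, c ∈ PySem.Set.ofList (pvLastC (pvFirst words) :: words.map pvLastC) ↔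
      c ∈ pvLastC (pvFirst words) :: words.map pvLastC) ∧
    (PySem.Set.ofList (pvLastC (pvFirst words) :: words.map pvLastC)).length ≤ words.length + 1 := by
  refine ⟨PySem.Set.nodup_ofList _, fun c => PySem.Set.mem_ofList _ c, ?_⟩
  have := pvOfList_length_le (pvLastC (pvFirst words) :: words.map pvLastC)
  simpa using this

lemma pvReach_iff (words : List String) (c : Char) :
    c ∈ pvReach words ↔ pvReachesC words c := by
  set U := PySem.Set.ofList (pvLastC (pvFirst words) :: words.map pvLastC) with hUdef
  obtain ⟨hUnd, hUmem, hUlen⟩ := pvU_spec words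
  set step := fun s => PySem.Set.ofList
      ((words.filter fun w => PySem.Set.contains s (pvHeadC w)).map pvLastC) with hstepdef
  have hstep_mem : ∀ (S : PySem.Set Char) (d : Char),
      d ∈ step S ↔ ∃ w ∈ words, PySem.Set.contains S (pvHeadC w) = true ∧ pvLastC w = d := by
    intro S d
    rw [hstepdef]
    simp only [PySem.Set.mem_ofList, List.mem_map]
    constructor
    · rintro ⟨w, hw, rfl⟩
      rw [List.mem_filter] at hw
      exact ⟨w, hw.1, hw.2, rfl⟩
    · rintro ⟨w, hw, hc, rfl⟩
      exact ⟨w, List.mem_filter.mpr ⟨hw, hc⟩, rfl⟩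
  constructor
  · intro hc
    refine pvSat_sound step (pvReachesC words) ?_ (words.length + 1) _ ?_ c hc
    · intro S hS d hd
      rw [hstep_mem] at hd
      obtain ⟨w, hw, hcont, rfl⟩ := hd
      have hhead : pvHeadC w ∈ S := (PySem.Set.contains_iff _ _).mp hcont
      exact Relation.ReflTransGen.tail (hS _ hhead) ⟨w, hw, rfl, rfl⟩
    · intro c' hc'
      rw [pvOfList_singleton] at hc'
      simp at hc'
      subst hc'
      exact Relation.ReflTransGen.refl
  · intro hc
    refine pvReach_min words _ ?_ ?_ c hc
    · have h0 : pvLastC (pvFirst words) ∈ PySem.Set.ofList [pvLastC (pvFirst words)] := by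
        rw [pvOfList_singleton]; simp
      exact ((pvSat_prefix step (words.length + 1) _).subset) h0
    · intro a b ha hb
      obtain ⟨w, hw, hwa, hwb⟩ := hb
      have hbstep : b ∈ step (pvReach words) := by
        rw [hstep_mem]
        exact ⟨w, hw, (PySem.Set.contains_iff _ _).mpr (hwa ▸ ha), hwb⟩
      refine pvSat_closed step U hUnd ?_ (words.length + 1) _ ?_ ?_ ?_ b hbstep
      · intro S hS d hd
        rw [hstep_mem] at hd
        obtain ⟨w', hw', _, rfl⟩ := hd
        rw [hUmem]
        exact List.mem_cons_of_mem _ (List.mem_map_of_mem hw')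
      · rw [pvOfList_singleton]; simp
      · intro c' hc'
        rw [pvOfList_singleton] at hc'
        simp at hc'
        subst hc'
        rw [hUmem]
        exact List.mem_cons_self
      · rw [pvOfList_singleton, hUdef]
        simp only [List.length_singleton]
        omega

lemma pvActive_iff (words : List String) (c : Char) :
    c ∈ pvSat (pvGrow (pvOuts words)) (words.length + 1)
        (PySem.Set.ofList [pvLastC (pvFirst words)]) ↔ pvReachesC words c := by
  set U := PySem.Set.ofList (pvLastC (pvFirst words) :: words.map pvLastC) with hUdef
  obtain ⟨hUnd, hUmem, hUlen⟩ := pvU_spec words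
  have hstep_mem : ∀ (S : PySem.Set Char) (d : Char),
      d ∈ pvGrow (pvOuts words) S ↔ ∃ w ∈ words, pvHeadC w ∈ S ∧ pvLastC w = d := by
    intro S d
    rw [pvMem_grow]
    constructor
    · rintro ⟨c', hc', hd⟩
      obtain ⟨w, hw, hwc, hwd⟩ := (pvMem_outs words c' d).mp hd
      exact ⟨w, hw, hwc ▸ hc', hwd⟩
    · rintro ⟨w, hw, hwS, rfl⟩
      exact ⟨pvHeadC w, hwS, (pvMem_outs words _ _).mpr ⟨w, hw, rfl, rfl⟩⟩
  constructor
  · intro hc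
    refine pvSat_sound _ (pvReachesC words) ?_ (words.length + 1) _ ?_ c hc
    · intro S hS d hd
      rw [hstep_mem] at hd
      obtain ⟨w, hw, hhead, rfl⟩ := hd
      exact Relation.ReflTransGen.tail (hS _ hhead) ⟨w, hw, rfl, rfl⟩
    · intro c' hc'
      rw [pvOfList_singleton] at hc'
      simp at hc'
      subst hc'
      exact Relation.ReflTransGen.refl
  · intro hc
    refine pvReach_min words _ ?_ ?_ c hc
    · have h0 : pvLastC (pvFirst words) ∈ PySem.Set.ofList [pvLastC (pvFirst words)] := by
        rw [pvOfList_singleton]; simp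
      exact ((pvSat_prefix (pvGrow (pvOuts words)) (words.length + 1) _).subset) h0
    · intro a b ha hb
      obtain ⟨w, hw, hwa, hwb⟩ := hb
      have hbstep : b ∈ pvGrow (pvOuts words)
          (pvSat (pvGrow (pvOuts words)) (words.length + 1)
            (PySem.Set.ofList [pvLastC (pvFirst words)])) := by
        rw [hstep_mem]
        exact ⟨w, hw, hwa ▸ ha, hwb⟩
      refine pvSat_closed _ U hUnd ?_ (words.length + 1) _ ?_ ?_ ?_ b hbstep
      · intro S hS d hd
        rw [hstep_mem] at hd
        obtain ⟨w', hw', _, rfl⟩ := hd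
        rw [hUmem]
        exact List.mem_cons_of_mem _ (List.mem_map_of_mem hw')
      · rw [pvOfList_singleton]; simp
      · intro c' hc'
        rw [pvOfList_singleton] at hc'
        simp at hc'
        subst hc'
        rw [hUmem]
        exact List.mem_cons_self
      · rw [pvOfList_singleton, hUdef]
        simp only [List.length_singleton]
        omega

-- ---- A-side DFS lemmas ----
lemma pvAdd_of_not_mem {α : Type} [BEq α] [LawfulBEq α] (s : PySem.Set α) (x : α)
    (hx : x ∉ s) : PySem.Set.add s x = s ++ [x] := by
  unfold PySem.Set.add
  simp [hx]

lemma pvFold_true (words : List String) (fm : PySem.Dict Char (PySem.Set String)) (fuel : Nat) :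
    ∀ (ws : List String) (s : PySem.Set String),
      ws.foldl (fun r w => if r.1 then r else pvWh words fm fuel w r.2) (true, s) = (true, s) := by
  intro ws s
  induction ws with
  | nil => rfl
  | cons w ws ihw => rw [List.foldl_cons, if_pos rfl]; exact ihw

lemma pvWh_prefix (words : List String) (fm : PySem.Dict Char (PySem.Set String)) :
    ∀ (fuel : Nat) (cur : String) (seen : PySem.Set String),
      seen <+: (pvWh words fm fuel cur seen).2 := by
  intro fuel
  induction fuel with
  | zero => intro cur seen; exact List.prefix_rfl
  | succ fuel ih =>
    have hfold : ∀ (ws : List String) (r : Bool × PySem.Set String),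
        r.2 <+: (ws.foldl (fun r w => if r.1 then r else pvWh words fm fuel w r.2) r).2 := by
      intro ws
      induction ws with
      | nil => intro r; exact List.prefix_rfl
      | cons w ws ihw =>
        intro r
        rw [List.foldl_cons]
        by_cases hb : r.1
        · rw [if_pos hb]; exact ihw r
        · rw [if_neg hb]
          exact (ih w r.2).trans (ihw _)
    intro cur seen
    simp only [pvWh]
    split
    · exact List.prefix_rfl
    · split
      · exact List.prefix_rfl
      · cases hm : fm.get? (pvLastC cur) with
        | none => exact pvPrefix_add seen cur
        | some succs =>
          exact (pvPrefix_add seen cur).trans (hfold succs (false, PySem.Set.add seen cur))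

lemma pvWh_nodup (words : List String) (fm : PySem.Dict Char (PySem.Set String)) :
    ∀ (fuel : Nat) (cur : String) (seen : PySem.Set String),
      seen.Nodup → (pvWh words fm fuel cur seen).2.Nodup := by
  intro fuel
  induction fuel with
  | zero => intro cur seen h; exact h
  | succ fuel ih =>
    have hfold : ∀ (ws : List String) (r : Bool × PySem.Set String), r.2.Nodup →
        (ws.foldl (fun r w => if r.1 then r else pvWh words fm fuel w r.2) r).2.Nodup := by
      intro ws
      induction ws with
      | nil => intro r h; exact h
      | cons w ws ihw =>
        intro r h
        rw [List.foldl_cons]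
        by_cases hb : r.1
        · rw [if_pos hb]; exact ihw r h
        · rw [if_neg hb]
          exact ihw _ (ih w r.2 h)
    intro cur seen h
    simp only [pvWh]
    split
    · exact h
    · split
      · exact h
      · cases hm : fm.get? (pvLastC cur) with
        | none => exact PySem.Set.nodup_add seen cur h
        | some succs =>
          exact hfold succs (false, PySem.Set.add seen cur) (PySem.Set.nodup_add seen cur h)

-- T-invariance: T contains seen and cur and is closed under fm-successors ⇒ it contains the result
lemma pvWh_inT (words : List String) (fm : PySem.Dict Char (PySem.Set String)) (T : List String)
    (hT : ∀ w ∈ T, ∀ v ∈ fm.getD (pvLastC w) PySem.Set.empty, v ∈ T) :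
    ∀ (fuel : Nat) (cur : String) (seen : PySem.Set String),
      (∀ x ∈ seen, x ∈ T) → cur ∈ T →
      ∀ x ∈ (pvWh words fm fuel cur seen).2, x ∈ T := by
  intro fuel
  induction fuel with
  | zero => intro cur seen hsub _; exact hsub
  | succ fuel ih =>
    have hfold : ∀ (ws : List String) (r : Bool × PySem.Set String),
        (∀ w ∈ ws, w ∈ T) → (∀ x ∈ r.2, x ∈ T) →
        ∀ x ∈ (ws.foldl (fun r w => if r.1 then r else pvWh words fm fuel w r.2) r).2, x ∈ T := by
      intro ws
      induction ws with
      | nil => intro r _ hsub; exact hsub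
      | cons w ws ihw =>
        intro r hws hsub
        rw [List.foldl_cons]
        by_cases hb : r.1
        · rw [if_pos hb]; exact ihw r (fun u hu => hws u (List.mem_cons_of_mem _ hu)) hsub
        · rw [if_neg hb]
          exact ihw _ (fun u hu => hws u (List.mem_cons_of_mem _ hu))
            (ih w r.2 hsub (hws w List.mem_cons_self))
    intro cur seen hsub hcur
    simp only [pvWh]
    split
    · exact hsub
    · split
      · exact hsub
      · have hadd : ∀ x ∈ PySem.Set.add seen cur, x ∈ T := by
          intro x hx
          rcases (PySem.Set.mem_add seen cur x).mp hx with h | rfl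
          · exact hsub x h
          · exact hcur
        cases hm : fm.get? (pvLastC cur) with
        | none => exact hadd
        | some succs =>
          have hsucc : ∀ w ∈ succs, w ∈ T := by
            intro w hw
            refine hT cur hcur w ?_
            rw [pvGetD_of_get?_some fm _ _ _ hm]
            exact hw
          exact hfold succs (false, PySem.Set.add seen cur) hsucc hadd

-- if such a T is moreover smaller than len(words), the DFS can never return True
lemma pvWh_false (words : List String) (fm : PySem.Dict Char (PySem.Set String)) (T : List String)
    (hT : ∀ w ∈ T, ∀ v ∈ fm.getD (pvLastC w) PySem.Set.empty, v ∈ T)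
    (hTnd : T.Nodup) (hTlt : T.length < words.length) :
    ∀ (fuel : Nat) (cur : String) (seen : PySem.Set String),
      (∀ x ∈ seen, x ∈ T) → cur ∈ T → seen.Nodup →
      (pvWh words fm fuel cur seen).1 = false := by
  intro fuel
  induction fuel with
  | zero => intro cur seen _ _ _; rfl
  | succ fuel ih =>
    intro cur seen hsub hcur hsnd
    simp only [pvWh]
    split
    · next hlen =>
      exfalso
      have h1 : words.length = seen.length := by
        have := hlen
        simp only [PySem.Set.len, Nat.cast_inj] at this
        exact this
      have h2 := pvNodup_subset_length seen T hsnd hTnd hsub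
      omega
    · split
      · rfl
      · have hadd : ∀ x ∈ PySem.Set.add seen cur, x ∈ T := by
          intro x hx
          rcases (PySem.Set.mem_add seen cur x).mp hx with h | rfl
          · exact hsub x h
          · exact hcur
        cases hm : fm.get? (pvLastC cur) with
        | none => simp only [hm]
        | some succs =>
          have hsucc : ∀ w ∈ succs, w ∈ T := by
            intro w hw
            refine hT cur hcur w ?_
            rw [pvGetD_of_get?_some fm _ _ _ hm]
            exact hw
          have hloop : ∀ (ws : List String) (r : Bool × PySem.Set String),
              (∀ w ∈ ws, w ∈ T) → r.1 = false → (∀ x ∈ r.2, x ∈ T) → r.2.Nodup →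
              (ws.foldl (fun r w => if r.1 then r else pvWh words fm fuel w r.2) r).1 = false := by
            intro ws
            induction ws with
            | nil => intro r _ hr1 _ _; exact hr1
            | cons w ws ihw =>
              intro r hws hr1 hrsub hrnd
              rw [List.foldl_cons, if_neg (by simp [hr1])]
              refine ihw _ (fun u hu => hws u (List.mem_cons_of_mem _ hu))
                (ih w r.2 hrsub (hws w List.mem_cons_self) hrnd) ?_ ?_
              · exact pvWh_inT words fm T hT fuel w r.2 hrsub (hws w List.mem_cons_self)
              · exact pvWh_nodup words fm fuel w r.2 hrnd
          exact hloop succs (false, PySem.Set.add seen cur) hsucc rfl hadd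
            (PySem.Set.nodup_add seen cur hsnd)

-- closure postcondition of a failed call: cur was visited and every newly visited word is fully explored
lemma pvWh_closure (words : List String) (fm : PySem.Dict Char (PySem.Set String))
    (hfm : ∀ c v, v ∈ fm.getD c PySem.Set.empty → v ∈ words) (hnd : words.Nodup) :
    ∀ (fuel : Nat) (cur : String) (seen : PySem.Set String),
      seen.Nodup → (∀ x ∈ seen, x ∈ words) → cur ∈ words →
      words.length < seen.length + fuel →
      (pvWh words fm fuel cur seen).1 = false →
      cur ∈ (pvWh words fm fuel cur seen).2 ∧
      (∀ x ∈ (pvWh words fm fuel cur seen).2, x ∉ seen →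
        ∀ v ∈ fm.getD (pvLastC x) PySem.Set.empty, v ∈ (pvWh words fm fuel cur seen).2) := by
  have hTw : ∀ w ∈ words, ∀ v ∈ fm.getD (pvLastC w) PySem.Set.empty, v ∈ words :=
    fun w _ v hv => hfm _ v hv
  intro fuel
  induction fuel with
  | zero =>
    intro cur seen hsnd hssub _ hfuel _
    exact absurd (pvNodup_subset_length seen words hsnd hnd hssub) (by omega)
  | succ fuel ih =>
    intro cur seen hsnd hssub hcur hfuel
    simp only [pvWh]
    split
    · intro hres; simp at hres
    · next hlen =>
      split
      · next hctn =>
        intro _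
        refine ⟨(PySem.Set.contains_iff seen cur).mp hctn, ?_⟩
        intro x hx hxn
        exact absurd hx hxn
      · next hctn =>
        have hcur_not : cur ∉ seen := fun h => hctn ((PySem.Set.contains_iff seen cur).mpr h)
        have hseen1 : PySem.Set.add seen cur = seen ++ [cur] := pvAdd_of_not_mem seen cur hcur_not
        have hlen1 : (PySem.Set.add seen cur).length = seen.length + 1 := by
          rw [hseen1]; simp
        have hadd_sub : ∀ x ∈ PySem.Set.add seen cur, x ∈ words := by
          intro x hx
          rcases (PySem.Set.mem_add seen cur x).mp hx with h | rfl
          · exact hssub x h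
          · exact hcur
        have hadd_nd : (PySem.Set.add seen cur).Nodup := PySem.Set.nodup_add seen cur hsnd
        cases hm : fm.get? (pvLastC cur) with
        | none =>
          intro _
          refine ⟨(PySem.Set.mem_add seen cur cur).mpr (Or.inr rfl), ?_⟩
          intro x hx hxn v hv
          have hxc : x = cur := by
            rcases (PySem.Set.mem_add seen cur x).mp hx with h | h
            · exact absurd h hxn
            · exact h
          subst hxc
          have : fm.getD (pvLastC x) PySem.Set.empty = PySem.Set.empty := by
            simp [PySem.Dict.getD, hm]
          rw [this] at hv
          simp [PySem.Set.empty] at hv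
        | some succs =>
          intro hres
          have hsucc_eq : succs = fm.getD (pvLastC cur) PySem.Set.empty :=
            (pvGetD_of_get?_some fm _ _ _ hm).symm
          have hsucc_w : ∀ w ∈ succs, w ∈ words := by
            intro w hw; rw [hsucc_eq] at hw; exact hfm _ w hw
          have hloop : ∀ (ws : List String) (r : Bool × PySem.Set String),
              (∀ w ∈ ws, w ∈ words) → r.1 = false → r.2.Nodup → (∀ x ∈ r.2, x ∈ words) →
              words.length < r.2.length + fuel →
              (ws.foldl (fun r w => if r.1 then r else pvWh words fm fuel w r.2) r).1 = false →
              r.2 <+: (ws.foldl (fun r w => if r.1 then r else pvWh words fm fuel w r.2) r).2 ∧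
              (∀ w ∈ ws, w ∈ (ws.foldl (fun r w => if r.1 then r else pvWh words fm fuel w r.2) r).2) ∧
              (∀ x ∈ (ws.foldl (fun r w => if r.1 then r else pvWh words fm fuel w r.2) r).2,
                x ∉ r.2 → ∀ v ∈ fm.getD (pvLastC x) PySem.Set.empty,
                  v ∈ (ws.foldl (fun r w => if r.1 then r else pvWh words fm fuel w r.2) r).2) := by
            intro ws
            induction ws with
            | nil =>
              intro r _ _ _ _ _ _
              exact ⟨List.prefix_rfl, fun w hw => absurd hw (List.not_mem_nil),
                fun x hx hxn => absurd hx hxn⟩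
            | cons w ws ihw =>
              intro r hws hr1 hrnd hrsub hrf hresf
              rw [List.foldl_cons, if_neg (by simp [hr1])] at hresf ⊢
              by_cases hb : (pvWh words fm fuel w r.2).1
              · exfalso
                have hr1e : pvWh words fm fuel w r.2 = (true, (pvWh words fm fuel w r.2).2) := by
                  exact Prod.ext hb rfl
                rw [hr1e, pvFold_true] at hresf
                simp at hresf
              · have hb' : (pvWh words fm fuel w r.2).1 = false := by simpa using hb
                have hwmem : w ∈ words := hws w List.mem_cons_self
                have hsub := ih w r.2 hrnd hrsub hwmem (by omega) hb'
                have hpre1 : r.2 <+: (pvWh words fm fuel w r.2).2 :=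
                  pvWh_prefix words fm fuel w r.2
                have hnd1 : (pvWh words fm fuel w r.2).2.Nodup :=
                  pvWh_nodup words fm fuel w r.2 hrnd
                have hsub1 : ∀ x ∈ (pvWh words fm fuel w r.2).2, x ∈ words :=
                  pvWh_inT words fm words hTw fuel w r.2 hrsub hwmem
                have hfl : words.length < (pvWh words fm fuel w r.2).2.length + fuel := by
                  have := hpre1.length_le
                  omega
                obtain ⟨hpre2, hws2, hcl2⟩ := ihw (pvWh words fm fuel w r.2)
                  (fun u hu => hws u (List.mem_cons_of_mem _ hu)) hb' hnd1 hsub1 hfl hresf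
                refine ⟨hpre1.trans hpre2, ?_, ?_⟩
                · intro u hu
                  rcases List.mem_cons.mp hu with rfl | hu'
                  · exact hpre2.subset (hsub.1)
                  · exact hws2 u hu'
                · intro x hx hxn v hv
                  by_cases hx1 : x ∈ (pvWh words fm fuel w r.2).2
                  · exact hpre2.subset (hsub.2 x hx1 hxn v hv)
                  · exact hcl2 x hx hx1 v hv
          obtain ⟨hpre, hwsin, hclo⟩ := hloop succs (false, PySem.Set.add seen cur) hsucc_w rfl
            hadd_nd hadd_sub (by simp only [hlen1]; omega) hres
          constructor
          · exact hpre.subset ((PySem.Set.mem_add seen cur cur).mpr (Or.inr rfl))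
          · intro x hx hxn v hv
            by_cases hxc : x = cur
            · subst hxc
              rw [← hsucc_eq] at hv
              exact hwsin v hv
            · have hxn1 : x ∉ PySem.Set.add seen cur := by
                intro hmem
                rcases (PySem.Set.mem_add seen cur x).mp hmem with h | h
                · exact hxn h
                · exact hxc h
              exact hclo x hx hxn1 v hv

-- with no dead end a failed call cannot have exhausted all words
lemma pvWh_bound (words : List String) (fm : PySem.Dict Char (PySem.Set String))
    (hmem : ∀ c v, v ∈ fm.getD c PySem.Set.empty ↔ v ∈ words ∧ pvHeadC v = c) (hnd : words.Nodup)
    (hnde : ∀ w ∈ words, ∃ u ∈ words, pvHeadC u = pvLastC w) :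
    ∀ (fuel : Nat) (cur : String) (seen : PySem.Set String),
      seen.Nodup → (∀ x ∈ seen, x ∈ words) → cur ∈ words →
      words.length < seen.length + fuel →
      (pvWh words fm fuel cur seen).1 = false →
      (pvWh words fm fuel cur seen).2.length < words.length := by
  have hfm : ∀ c v, v ∈ fm.getD c PySem.Set.empty → v ∈ words :=
    fun c v hv => ((hmem c v).mp hv).1
  have hTw : ∀ w ∈ words, ∀ v ∈ fm.getD (pvLastC w) PySem.Set.empty, v ∈ words :=
    fun w _ v hv => hfm _ v hv
  intro fuel
  induction fuel with
  | zero =>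
    intro cur seen hsnd hssub _ hfuel _
    exact absurd (pvNodup_subset_length seen words hsnd hnd hssub) (by omega)
  | succ fuel ih =>
    intro cur seen hsnd hssub hcur hfuel
    simp only [pvWh]
    split
    · intro hres; simp at hres
    · next hlen =>
      split
      · next hctn =>
        intro _
        have hle := pvNodup_subset_length seen words hsnd hnd hssub
        have hne : words.length ≠ seen.length := by
          intro h
          exact hlen (by simp [PySem.Set.len, h])
        show seen.length < words.length
        omega
      · next hctn =>
        have hcur_not : cur ∉ seen := fun h => hctn ((PySem.Set.contains_iff seen cur).mpr h)
        have hlen1 : (PySem.Set.add seen cur).length = seen.length + 1 := by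
          rw [pvAdd_of_not_mem seen cur hcur_not]; simp
        have hadd_sub : ∀ x ∈ PySem.Set.add seen cur, x ∈ words := by
          intro x hx
          rcases (PySem.Set.mem_add seen cur x).mp hx with h | rfl
          · exact hssub x h
          · exact hcur
        have hadd_nd : (PySem.Set.add seen cur).Nodup := PySem.Set.nodup_add seen cur hsnd
        obtain ⟨u, hu, huh⟩ := hnde cur hcur
        cases hm : fm.get? (pvLastC cur) with
        | none =>
          exfalso
          have hun : u ∈ fm.getD (pvLastC cur) PySem.Set.empty := (hmem _ u).mpr ⟨hu, huh⟩
          have : fm.getD (pvLastC cur) PySem.Set.empty = PySem.Set.empty := by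
            simp [PySem.Dict.getD, hm]
          rw [this] at hun
          simp [PySem.Set.empty] at hun
        | some succs =>
          intro hres
          have hsucc_eq : succs = fm.getD (pvLastC cur) PySem.Set.empty :=
            (pvGetD_of_get?_some fm _ _ _ hm).symm
          have hsucc_w : ∀ w ∈ succs, w ∈ words := by
            intro w hw; rw [hsucc_eq] at hw; exact hfm _ w hw
          have hsne : succs ≠ [] := by
            intro h
            have hun : u ∈ succs := by
              rw [hsucc_eq]; exact (hmem _ u).mpr ⟨hu, huh⟩
            rw [h] at hun
            exact absurd hun (List.not_mem_nil)
          have hloop : ∀ (ws : List String) (r : Bool × PySem.Set String), ws ≠ [] →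
              (∀ w ∈ ws, w ∈ words) → r.1 = false → r.2.Nodup → (∀ x ∈ r.2, x ∈ words) →
              words.length < r.2.length + fuel →
              (ws.foldl (fun r w => if r.1 then r else pvWh words fm fuel w r.2) r).1 = false →
              (ws.foldl (fun r w => if r.1 then r else pvWh words fm fuel w r.2) r).2.length
                < words.length := by
            intro ws
            induction ws with
            | nil => intro r h; exact absurd rfl h
            | cons w ws ihw =>
              intro r _ hws hr1 hrnd hrsub hrf hresf
              rw [List.foldl_cons, if_neg (by simp [hr1])] at hresf ⊢
              by_cases hb : (pvWh words fm fuel w r.2).1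
              · exfalso
                have hr1e : pvWh words fm fuel w r.2 = (true, (pvWh words fm fuel w r.2).2) :=
                  Prod.ext hb rfl
                rw [hr1e, pvFold_true] at hresf
                simp at hresf
              · have hb' : (pvWh words fm fuel w r.2).1 = false := by simpa using hb
                have hwmem : w ∈ words := hws w List.mem_cons_self
                have hnd1 : (pvWh words fm fuel w r.2).2.Nodup :=
                  pvWh_nodup words fm fuel w r.2 hrnd
                have hsub1 : ∀ x ∈ (pvWh words fm fuel w r.2).2, x ∈ words :=
                  pvWh_inT words fm words hTw fuel w r.2 hrsub hwmem
                have hfl : words.length < (pvWh words fm fuel w r.2).2.length + fuel := by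
                  have := (pvWh_prefix words fm fuel w r.2).length_le
                  omega
                rcases eq_or_ne ws [] with rfl | hwsne
                · rw [List.foldl_nil] at hresf ⊢
                  exact ih w r.2 hrnd hrsub hwmem (by omega) hb'
                · exact ihw _ hwsne (fun u' hu' => hws u' (List.mem_cons_of_mem _ hu')) hb'
                    hnd1 hsub1 hfl hresf
          exact hloop succs (false, PySem.Set.add seen cur) hsne hsucc_w rfl hadd_nd hadd_sub
            (by show words.length < (PySem.Set.add seen cur).length + fuel; omega) hres

-- ===== VERDICT (by name: the statement is the Claim_ definition above) =====
lemma pvSlice_one (words : List String) : PySem.List.slice words (some 1) = words.drop 1 := by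
  have h := PySem.List.slice_from words (a := 1) (by norm_num)
  simpa using h

theorem can_chain_spec : Claim_equal_can_chain := by
  unfold Claim_equal_can_chain
  intro words _ hpre
  unfold Spec_can_chain
  obtain ⟨hne, _, hcorner⟩ := hpre
  obtain ⟨h0, t, heq⟩ := List.exists_cons_of_ne_nil hne
  have hw0 : pvFirst words ∈ words := by
    rw [heq]; simp [pvFirst]
  have hsplit : ∀ w ∈ words, w = pvFirst words ∨ w ∈ words.drop 1 := by
    rw [heq]
    intro w hw
    rcases List.mem_cons.mp hw with rfl | hw'
    · left; simp [pvFirst]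
    · right; simpa using hw'
  have hmem := pvMem_fm words
  have hfm : ∀ c v, v ∈ (pvFirstMap words).getD c PySem.Set.empty → v ∈ words :=
    fun c v hv => ((hmem c v).mp hv).1
  have hTw : ∀ w ∈ words, ∀ v ∈ (pvFirstMap words).getD (pvLastC w) PySem.Set.empty, v ∈ words :=
    fun w _ v hv => hfm _ v hv
  have hempty_sub : ∀ x ∈ (PySem.Set.empty : PySem.Set String), x ∈ words := by
    intro x hx; simp [PySem.Set.empty] at hx
  have hempty_nd : (PySem.Set.empty : PySem.Set String).Nodup := List.nodup_nil
  by_cases hnd : words.Nodup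
  · by_cases hall : ∀ w ∈ words.drop 1, pvReachesC words (pvHeadC w)
    · -- all words reachable; Pre_ then rules out dead ends
      have hnde : ∀ w ∈ words, ∃ u ∈ words, pvHeadC u = pvLastC w := by
        by_contra hcon
        push_neg at hcon
        obtain ⟨w, hw, hwno⟩ := hcon
        exact hcorner ⟨hnd,
          fun w' hw' => (pvReach_iff words _).mpr (hall w' hw'), ⟨w, hw, hwno⟩⟩
      have hfuel : words.length < (PySem.Set.empty : PySem.Set String).length
          + (words.length + 1) := by
        simp [PySem.Set.empty]
      -- A returns true
      have hA : (pvWh words (pvFirstMap words) (words.length + 1) (pvFirst words)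
          PySem.Set.empty).1 = true := by
        cases hAc : (pvWh words (pvFirstMap words) (words.length + 1) (pvFirst words)
            PySem.Set.empty).1 with
        | true => rfl
        | false =>
          exfalso
          obtain ⟨hcurin, hclo⟩ := pvWh_closure words (pvFirstMap words) hfm hnd
            (words.length + 1) (pvFirst words) PySem.Set.empty hempty_nd hempty_sub hw0
            hfuel hAc
          have hclo' : ∀ x ∈ (pvWh words (pvFirstMap words) (words.length + 1) (pvFirst words)
              PySem.Set.empty).2, ∀ v ∈ (pvFirstMap words).getD (pvLastC x) PySem.Set.empty,
              v ∈ (pvWh words (pvFirstMap words) (words.length + 1) (pvFirst words)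
                PySem.Set.empty).2 := by
            intro x hx
            exact hclo x hx (by simp [PySem.Set.empty])
          have hcharReach : ∀ c, pvReachesC words c →
              ∀ v ∈ words, pvHeadC v = c →
              v ∈ (pvWh words (pvFirstMap words) (words.length + 1) (pvFirst words)
                PySem.Set.empty).2 := by
            intro c hc
            induction hc with
            | refl =>
              intro v hv hveq
              exact hclo' (pvFirst words) hcurin v ((hmem _ v).mpr ⟨hv, hveq⟩)
            | tail _ hbc ihc =>
              obtain ⟨u, hu, hub, huc⟩ := hbc
              intro v hv hveq
              have hures := ihc u hu hub
              exact hclo' u hures v ((hmem _ v).mpr ⟨hv, huc ▸ hveq⟩)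
          have hallin : ∀ w ∈ words,
              w ∈ (pvWh words (pvFirstMap words) (words.length + 1) (pvFirst words)
                PySem.Set.empty).2 := by
            intro w hw
            rcases hsplit w hw with rfl | hdrop
            · exact hcurin
            · exact hcharReach (pvHeadC w) (hall w hdrop) w hw rfl
          have hndres := pvWh_nodup words (pvFirstMap words) (words.length + 1) (pvFirst words)
            PySem.Set.empty hempty_nd
          have hge := pvNodup_subset_length words _ hnd hndres hallin
          have hlt := pvWh_bound words (pvFirstMap words) hmem hnd hnde (words.length + 1)
            (pvFirst words) PySem.Set.empty hempty_nd hempty_sub hw0 hfuel hAc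
          omega
      -- B returns true as well
      unfold can_chain can_chain_alt
      rw [hA, if_neg (by simp [PySem.Set.len, (pvOfList_len_eq_iff words).mpr hnd])]
      symm
      rw [List.all_eq_true]
      intro w hw
      rw [pvSlice_one] at hw
      refine (PySem.Set.contains_iff _ _).mpr ?_
      exact (pvActive_iff words (pvHeadC w)).mpr (hall w (by simpa using hw))
    · -- some word unreachable: both sides false
      push_neg at hall
      obtain ⟨wstar, hwsdrop, hwsnr⟩ := hall
      have hwsw : wstar ∈ words := List.drop_subset 1 words hwsdrop
      -- the trap set T
      set T := PySem.Set.ofList (pvFirst words ::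
        words.filter fun w => PySem.Set.contains (pvReach words) (pvHeadC w)) with hTdef
      have hTnd : T.Nodup := PySem.Set.nodup_ofList _
      have hTmem : ∀ x, x ∈ T ↔ x = pvFirst words ∨
          (x ∈ words ∧ PySem.Set.contains (pvReach words) (pvHeadC x) = true) := by
        intro x
        rw [hTdef, PySem.Set.mem_ofList]
        simp [List.mem_filter]
      have hTsub : ∀ x ∈ T, x ∈ words := by
        intro x hx
        rcases (hTmem x).mp hx with rfl | ⟨hxw, _⟩
        · exact hw0
        · exact hxw
      have hT : ∀ w ∈ T, ∀ v ∈ (pvFirstMap words).getD (pvLastC w) PySem.Set.empty, v ∈ T := by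
        intro x hx v hv
        obtain ⟨hvw, hvh⟩ := (hmem _ v).mp hv
        have hreach : pvReachesC words (pvLastC x) := by
          rcases (hTmem x).mp hx with rfl | ⟨hxw, hxc⟩
          · exact Relation.ReflTransGen.refl
          · exact Relation.ReflTransGen.tail
              ((pvReach_iff words _).mp ((PySem.Set.contains_iff _ _).mp hxc))
              ⟨x, hxw, rfl, rfl⟩
        refine (hTmem v).mpr (Or.inr ⟨hvw, ?_⟩)
        refine (PySem.Set.contains_iff _ _).mpr ?_
        rw [hvh]
        exact (pvReach_iff words _).mpr hreach
      have hwsT : wstar ∉ T := by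
        intro hmemT
        rcases (hTmem wstar).mp hmemT with hfst | ⟨_, hc⟩
        · have : pvFirst words ∉ words.drop 1 := by
            rw [heq]
            have hh0 : h0 ∉ t := (List.nodup_cons.mp (heq ▸ hnd)).1
            simpa [pvFirst, PySem.List.pyGet?_zero_cons] using hh0
          exact this (hfst ▸ hwsdrop)
        · exact hwsnr ((pvReach_iff words _).mp ((PySem.Set.contains_iff _ _).mp hc))
      have hTlt : T.length < words.length := by
        have h1 : T.toFinset ⊂ words.toFinset := by
          constructor
          · intro a ha
            exact List.mem_toFinset.mpr (hTsub a (List.mem_toFinset.mp ha))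
          · intro hsup
            exact hwsT (List.mem_toFinset.mp (hsup (List.mem_toFinset.mpr hwsw)))
        calc T.length = T.toFinset.card := (List.toFinset_card_of_nodup hTnd).symm
          _ < words.toFinset.card := Finset.card_lt_card h1
          _ = words.length := List.toFinset_card_of_nodup hnd
      have hA : (pvWh words (pvFirstMap words) (words.length + 1) (pvFirst words)
          PySem.Set.empty).1 = false :=
        pvWh_false words (pvFirstMap words) T hT hTnd hTlt (words.length + 1) (pvFirst words)
          PySem.Set.empty (by intro x hx; simp [PySem.Set.empty] at hx)
          ((hTmem _).mpr (Or.inl rfl)) hempty_nd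
      unfold can_chain can_chain_alt
      rw [hA, if_neg (by simp [PySem.Set.len, (pvOfList_len_eq_iff words).mpr hnd])]
      symm
      refine Bool.eq_false_iff.mpr ?_
      intro hcontra
      rw [List.all_eq_true] at hcontra
      have hws_slice : wstar ∈ PySem.List.slice words (some 1) := by
        rw [pvSlice_one]
        simpa using hwsdrop
      exact hwsnr ((pvActive_iff words (pvHeadC wstar)).mp
        ((PySem.Set.contains_iff _ _).mp (hcontra wstar hws_slice)))
  · -- duplicate words: both sides false
    have hT : ∀ w ∈ PySem.Set.ofList words,
        ∀ v ∈ (pvFirstMap words).getD (pvLastC w) PySem.Set.empty, v ∈ PySem.Set.ofList words :=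
      fun w _ v hv => (PySem.Set.mem_ofList words v).mpr (hfm _ v hv)
    have hTlt : (PySem.Set.ofList words).length < words.length := by
      have h1 := pvOfList_length_le words
      have h2 : (PySem.Set.ofList words).length ≠ words.length := by
        intro h
        exact hnd ((pvOfList_len_eq_iff words).mp h)
      omega
    have hA : (pvWh words (pvFirstMap words) (words.length + 1) (pvFirst words)
        PySem.Set.empty).1 = false :=
      pvWh_false words (pvFirstMap words) (PySem.Set.ofList words) hT
        (PySem.Set.nodup_ofList words) hTlt (words.length + 1) (pvFirst words) PySem.Set.empty
        (by intro x hx; simp [PySem.Set.empty] at hx)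
        ((PySem.Set.mem_ofList words _).mpr hw0) hempty_nd
    unfold can_chain can_chain_alt
    rw [hA, if_pos]
    simp only [PySem.Set.len, ne_eq, Nat.cast_inj]
    intro h
    exact hnd ((pvOfList_len_eq_iff words).mp h)
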